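-- pv_equiv track=rewrite | github.com/harini24/algoexpert-solutions | Strings/underscorify substring/O(nm)_time_O(1)_space.py | underscorifySubstring
-- ===== SOURCE A (Python) =====
-- def underscorifySubstring(string, substring):
--     # Write your code here.
--     open=-1
--     close=-1
--     curr=0
--     ans=""
--     m=len(string)
--     n=len(substring)
--     while curr<m:
--         sub = string[curr:curr+n]
--         if sub == substring:
--             if open<0:
--                 ans+='_'
--                 open=curr
--             close=curr+n
--         elif curr==close:
--             ans+="_"
--             open=-1
--             close=-1
--
--         ans += string[curr]
--         curr+=1
--
--     if close>0:
--         ans+='_'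
--     return ans
-- ===== SOURCE B (Python) =====
-- def underscorifySubstring(string, substring):
--     n = len(substring)
--     # 1) all match positions
--     starts = [i for i in range(len(string)) if string.startswith(substring, i)]
--     # 2) merge overlapping/adjacent occurrences into disjoint intervals
--     intervals = []
--     for s in starts:
--         if intervals and s <= intervals[-1][1]:
--             intervals[-1][1] = s + n
--         else:
--             intervals.append([s, s + n])
--     # 3) stitch the output from whole slices
--     pieces = []
--     prev = 0
--     for a, b in intervals:
--         pieces.append(string[prev:a])
--         pieces.append('_')
--         pieces.append(string[a:b])
--         pieces.append('_')
--         prev = b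
--     pieces.append(string[prev:])
--     return ''.join(pieces)
-- ===== Notes on version B (the rewrite author's own statement) =====
-- stated objective: faster
-- what changed: A's single stateful scan with open/close sentinel indices is replaced by three independent phases: collect all match positions, merge overlapping/adjacent occurrences into disjoint intervals, then stitch the output from whole slices.
-- outside the precondition, e.g. on underscorifySubstring('ab', ''): A returns '_ab_', B returns '__a__b'
import Mathlib
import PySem

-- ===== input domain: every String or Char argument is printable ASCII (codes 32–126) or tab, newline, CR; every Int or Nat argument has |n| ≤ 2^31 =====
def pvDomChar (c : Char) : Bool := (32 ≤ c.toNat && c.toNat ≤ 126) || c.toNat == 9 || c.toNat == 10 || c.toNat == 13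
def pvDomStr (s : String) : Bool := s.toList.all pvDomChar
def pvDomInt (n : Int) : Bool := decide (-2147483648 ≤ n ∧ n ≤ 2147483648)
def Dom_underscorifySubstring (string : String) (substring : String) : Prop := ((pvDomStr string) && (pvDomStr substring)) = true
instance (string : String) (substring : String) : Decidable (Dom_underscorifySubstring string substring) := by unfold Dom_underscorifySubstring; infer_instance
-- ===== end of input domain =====

-- B replaces A's single stateful scan (open/close sentinels) by three phases: list all match
-- positions, merge them into disjoint intervals, then stitch the output from whole slices
-- (objective: faster by the measured constant factor — startswith instead of a fresh slice per
-- position and one final join instead of repeated string concatenation; same O(n*m) bound).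

-- ===== PORT A =====
-- A's while-loop over `curr` with state (open, close, ans); chars handled as List Char,
-- string[curr:curr+n] with curr ≥ 0 is exactly (drop curr).take n.
def runA (cs ss : List Char) (curr : Nat) (opn close : Int) (ans : List Char) : List Char :=
  if h : curr < cs.length then
    if (cs.drop curr).take ss.length = ss then
      runA cs ss (curr + 1) (if opn < 0 then (curr : Int) else opn) ((curr : Int) + ss.length)
        ((if opn < 0 then ans ++ ['_'] else ans) ++ [cs[curr]])
    else if (curr : Int) = close then
      runA cs ss (curr + 1) (-1) (-1) (ans ++ ['_'] ++ [cs[curr]])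
    else
      runA cs ss (curr + 1) opn close (ans ++ [cs[curr]])
  else if 0 < close then ans ++ ['_'] else ans
termination_by cs.length - curr

def underscorifySubstring (string : String) (substring : String) : String :=
  String.ofList (runA string.toList substring.toList 0 (-1) (-1) [])

-- ===== PORT B =====
-- Source B mutates intervals[-1]; the port keeps the interval list reversed (head = last) and
-- reverses it at the end, the literal functional rendering of append/mutate-last.
def mergeStep (n : Nat) (acc : List (Nat × Nat)) (s : Nat) : List (Nat × Nat) :=
  match acc with
  | (a, b) :: rest => if s ≤ b then (a, s + n) :: rest else (s, s + n) :: (a, b) :: rest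
  | [] => [(s, s + n)]

-- the stitching loop over the intervals (string[prev:a] + '_' + string[a:b] + '_'), then string[prev:]
def stitchB (cs : List Char) (prev : Nat) : List (Nat × Nat) → List Char
  | [] => cs.drop prev
  | (a, b) :: rest =>
      ((cs.drop prev).take (a - prev)) ++ '_' :: (((cs.drop a).take (b - a)) ++ '_' :: stitchB cs b rest)

def underscorifySubstring_alt (string : String) (substring : String) : String :=
  let cs := string.toList
  let ss := substring.toList
  let starts := (List.range cs.length).filter (fun i => ss.isPrefixOf (cs.drop i))
  let intervals := (starts.foldl (mergeStep ss.length) []).reverse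
  String.ofList (stitchB cs 0 intervals)

-- ===== PRECONDITION & SPEC =====
-- Pre_ excludes only the empty substring, a corner nobody specifies: there A's open/close
-- bookkeeping happens to print "_s_" (no trailing '_' for len 1) while B's empty intervals
-- underscorify nothing contiguous; both values are accidents.
def Pre_underscorifySubstring (string : String) (substring : String) : Prop := substring ≠ ""
instance (string : String) (substring : String) : Decidable (Pre_underscorifySubstring string substring) := by
  unfold Pre_underscorifySubstring; infer_instance

def pvWitness_underscorifySubstring : String × String := ("testthis is a testtest to see", "test")

def Spec_underscorifySubstring (string : String) (substring : String) (out : String) : Prop := out = underscorifySubstring_alt string substring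
instance (string : String) (substring : String) (out : String) : Decidable (Spec_underscorifySubstring string substring out) := by unfold Spec_underscorifySubstring; infer_instance

-- ===== CLAIM (what is proved, stated in full; the proofs are below) =====
def Claim_equal_underscorifySubstring : Prop := ∀ (string : String) (substring : String), Dom_underscorifySubstring string substring → Pre_underscorifySubstring string substring → Spec_underscorifySubstring string substring (underscorifySubstring string substring)

-- ===== LEMMAS AND PROOFS =====

-- The common "event stream": what both programs print from position j onward.
-- mode none = no open run; mode (some e) = inside a run whose current reach is e (A's close).
def matchAt (cs ss : List Char) (j : Nat) : Bool := ss.isPrefixOf (cs.drop j)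

def emitE (cs ss : List Char) (j : Nat) (mode : Option Nat) : List Char :=
  if h : j < cs.length then
    match mode with
    | none =>
        if matchAt cs ss j then '_' :: cs[j] :: emitE cs ss (j + 1) (some (j + ss.length))
        else cs[j] :: emitE cs ss (j + 1) none
    | some e =>
        if matchAt cs ss j then cs[j] :: emitE cs ss (j + 1) (some (j + ss.length))
        else if j = e then '_' :: cs[j] :: emitE cs ss (j + 1) none
        else cs[j] :: emitE cs ss (j + 1) (some e)
  else match mode with
    | none => []
    | some _ => ['_']
termination_by cs.length - j

-- all match positions ≥ j, in increasing order
def matchesFrom (cs ss : List Char) (j : Nat) : List Nat :=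
  if j < cs.length then
    if matchAt cs ss j then j :: matchesFrom cs ss (j + 1) else matchesFrom cs ss (j + 1)
  else []
termination_by cs.length - j

-- end of the chain started with reach e, and the starts left after it
def chainE (n e : Nat) : List Nat → Nat
  | [] => e
  | s :: l => if s ≤ e then chainE n (s + n) l else e

def chainRest (n e : Nat) : List Nat → List Nat
  | [] => []
  | s :: l => if s ≤ e then chainRest n (s + n) l else s :: l

lemma chainRest_length (n : Nat) : ∀ (l : List Nat) (e : Nat), (chainRest n e l).length ≤ l.length := by
  intro l
  induction l with
  | nil => intro e; simp [chainRest]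
  | cons s l ih =>
      intro e
      simp only [chainRest]
      split
      · exact le_trans (ih _) (Nat.le_succ _)
      · exact le_refl _

-- recursive description of B's merged-interval list
def mergeTop (n : Nat) : List Nat → List (Nat × Nat)
  | [] => []
  | s :: l => (s, chainE n (s + n) l) :: mergeTop n (chainRest n (s + n) l)
termination_by l => l.length
decreasing_by exact Nat.lt_succ_of_le (chainRest_length n l (s + n))

def mergedFrom (n a e : Nat) : List Nat → List (Nat × Nat)
  | [] => [(a, e)]
  | s :: l => if s ≤ e then mergedFrom n a (s + n) l else (a, e) :: mergedFrom n s (s + n) l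

-- A's slice test is the prefix test
lemma match_iff (cs ss : List Char) (j : Nat) :
    ((cs.drop j).take ss.length = ss) ↔ matchAt cs ss j = true := by
  unfold matchAt
  rw [List.isPrefixOf_iff_prefix]
  constructor
  · intro h; rw [← h]; exact List.take_prefix _ _
  · intro h; exact (List.prefix_iff_eq_take.mp h).symm

lemma matchAt_le {cs ss : List Char} {j : Nat} (h : matchAt cs ss j = true) (hss : ss ≠ []) :
    j + ss.length ≤ cs.length := by
  unfold matchAt at h
  rw [List.isPrefixOf_iff_prefix] at h
  have h1 : ss.length ≤ (cs.drop j).length := h.length_le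
  rw [List.length_drop] at h1
  have h2 : 0 < ss.length := List.length_pos_of_ne_nil hss
  omega

lemma matchesFrom_ge (cs ss : List Char) : ∀ j x, x ∈ matchesFrom cs ss j → j ≤ x := by
  have key : ∀ k j x, cs.length - j ≤ k → x ∈ matchesFrom cs ss j → j ≤ x := by
    intro k
    induction k with
    | zero =>
        intro j x hk hx
        rw [matchesFrom, if_neg (by omega)] at hx
        simp at hx
    | succ k ih =>
        intro j x hk hx
        rw [matchesFrom] at hx
        by_cases hj : j < cs.length
        · rw [if_pos hj] at hx
          by_cases hm : matchAt cs ss j = true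
          · rw [if_pos hm] at hx
            rcases List.mem_cons.mp hx with h | h
            · omega
            · have := ih (j + 1) x (by omega) h; omega
          · rw [if_neg hm] at hx
            have := ih (j + 1) x (by omega) hx; omega
        · rw [if_neg hj] at hx; simp at hx
  intro j x hx
  exact key (cs.length - j) j x le_rfl hx

lemma matchesFrom_stop (cs ss : List Char) (j : Nat) (h : ¬ j < cs.length) :
    matchesFrom cs ss j = [] := by
  rw [matchesFrom, if_neg h]

lemma chainE_lb (n : Nat) : ∀ (l : List Nat) (e c : Nat), (∀ x ∈ l, c ≤ x + n) → c ≤ e →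
    c ≤ chainE n e l := by
  intro l
  induction l with
  | nil => intro e c _ h; simpa [chainE] using h
  | cons s l ih =>
      intro e c hall he
      simp only [chainE]
      split
      · exact ih (s + n) c (fun x hx => hall x (List.mem_cons_of_mem _ hx)) (hall s List.mem_cons_self)
      · exact he

lemma chain_stop (n : Nat) : ∀ (l : List Nat) (e : Nat), (∀ x ∈ l, e < x) →
    chainE n e l = e ∧ chainRest n e l = l := by
  intro l e h
  cases l with
  | nil => exact ⟨rfl, rfl⟩
  | cons s l =>
      have hs : e < s := h s List.mem_cons_self
      constructor
      · simp only [chainE]; rw [if_neg (by omega)]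
      · simp only [chainRest]; rw [if_neg (by omega)]

lemma mergedFrom_eq (n : Nat) : ∀ (l : List Nat) (a e : Nat),
    mergedFrom n a e l = (a, chainE n e l) :: mergeTop n (chainRest n e l) := by
  intro l
  induction l with
  | nil => intro a e; simp [mergedFrom, chainE, chainRest, mergeTop]
  | cons s l ih =>
      intro a e
      simp only [mergedFrom, chainE, chainRest]
      split
      · exact ih a (s + n)
      · rw [mergeTop]
        exact congrArg _ (ih s (s + n))

lemma foldl_mergeStep_cons (n : Nat) : ∀ (l : List Nat) (x : Nat × Nat) (R : List (Nat × Nat)),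
    List.foldl (mergeStep n) (x :: R) l = List.foldl (mergeStep n) [x] l ++ R := by
  intro l
  induction l with
  | nil => intro x R; simp
  | cons s l ih =>
      intro x R
      obtain ⟨a, b⟩ := x
      simp only [List.foldl_cons, mergeStep]
      split
      · exact ih (a, s + n) R
      · rw [ih (s, s + n) ((a, b) :: R), ih (s, s + n) [(a, b)]]
        simp

lemma foldl_mergedFrom (n : Nat) : ∀ (l : List Nat) (a e : Nat),
    (List.foldl (mergeStep n) [(a, e)] l).reverse = mergedFrom n a e l := by
  intro l
  induction l with
  | nil => intro a e; simp [mergedFrom]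
  | cons s l ih =>
      intro a e
      simp only [List.foldl_cons, mergeStep, mergedFrom]
      split
      · exact ih a (s + n)
      · rw [foldl_mergeStep_cons n l (s, s + n) [(a, e)]]
        simp [ih s (s + n)]

lemma foldl_mergeTop (n : Nat) (l : List Nat) :
    (List.foldl (mergeStep n) [] l).reverse = mergeTop n l := by
  cases l with
  | nil => simp [mergeTop]
  | cons s l =>
      simp only [List.foldl_cons, mergeStep]
      rw [foldl_mergedFrom n l s (s + n), mergedFrom_eq, mergeTop]

lemma matchesFrom_eq_filter (cs ss : List Char) : ∀ j, matchesFrom cs ss j =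
    (List.range' j (cs.length - j)).filter (fun i => matchAt cs ss i) := by
  have key : ∀ k j, cs.length - j ≤ k →
      matchesFrom cs ss j = (List.range' j (cs.length - j)).filter (fun i => matchAt cs ss i) := by
    intro k
    induction k with
    | zero =>
        intro j hk
        have h0 : cs.length - j = 0 := by omega
        rw [matchesFrom_stop cs ss j (by omega), h0]
        simp
    | succ k ih =>
        intro j hk
        by_cases hj : j < cs.length
        · have hsub : cs.length - j = (cs.length - (j + 1)) + 1 := by omega
          rw [matchesFrom, if_pos hj, hsub, List.range'_succ, List.filter_cons,
            ih (j + 1) (by omega)]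
        · have h0 : cs.length - j = 0 := by omega
          rw [matchesFrom_stop cs ss j hj, h0]
          simp
  intro j
  exact key (cs.length - j) j le_rfl

lemma stitch_peel (cs : List Char) (j : Nat) (L : List (Nat × Nat)) (hj : j < cs.length)
    (hL : ∀ p ∈ L.head?, j < p.1) : stitchB cs j L = cs[j] :: stitchB cs (j + 1) L := by
  cases L with
  | nil =>
      simp only [stitchB]
      exact List.drop_eq_getElem_cons hj
  | cons p rest =>
      obtain ⟨a, b⟩ := p
      have ha : j < a := hL (a, b) (by simp)
      simp only [stitchB]
      rw [List.drop_eq_getElem_cons hj]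
      have hab : a - j = (a - (j + 1)) + 1 := by omega
      rw [hab, List.take_succ_cons]
      simp

-- unfolding lemmas for the recursive definitions
lemma matchesFrom_cons {cs ss : List Char} {j : Nat} (hj : j < cs.length)
    (hm : matchAt cs ss j = true) : matchesFrom cs ss j = j :: matchesFrom cs ss (j + 1) := by
  rw [matchesFrom, if_pos hj, if_pos hm]

lemma matchesFrom_skip {cs ss : List Char} {j : Nat} (hj : j < cs.length)
    (hm : ¬ matchAt cs ss j = true) : matchesFrom cs ss j = matchesFrom cs ss (j + 1) := by
  rw [matchesFrom, if_pos hj, if_neg hm]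

lemma emitE_stop_dead {cs ss : List Char} {j : Nat} (hj : ¬ j < cs.length) :
    emitE cs ss j none = [] := by
  rw [emitE, dif_neg hj]

lemma emitE_stop_live {cs ss : List Char} {j e : Nat} (hj : ¬ j < cs.length) :
    emitE cs ss j (some e) = ['_'] := by
  rw [emitE, dif_neg hj]

lemma emitE_dead_match {cs ss : List Char} {j : Nat} (hj : j < cs.length)
    (hm : matchAt cs ss j = true) :
    emitE cs ss j none = '_' :: cs[j] :: emitE cs ss (j + 1) (some (j + ss.length)) := by
  conv_lhs => rw [emitE]
  rw [dif_pos hj]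
  simp only [hm, if_true]

lemma emitE_dead_skip {cs ss : List Char} {j : Nat} (hj : j < cs.length)
    (hm : ¬ matchAt cs ss j = true) :
    emitE cs ss j none = cs[j] :: emitE cs ss (j + 1) none := by
  conv_lhs => rw [emitE]
  rw [dif_pos hj]
  simp only [Bool.not_eq_true] at hm
  simp only [hm, if_false, Bool.false_eq_true]

lemma emitE_live_match {cs ss : List Char} {j e : Nat} (hj : j < cs.length)
    (hm : matchAt cs ss j = true) :
    emitE cs ss j (some e) = cs[j] :: emitE cs ss (j + 1) (some (j + ss.length)) := by
  conv_lhs => rw [emitE]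
  rw [dif_pos hj]
  simp only [hm, if_true]

lemma emitE_live_close {cs ss : List Char} {j : Nat} (hj : j < cs.length)
    (hm : ¬ matchAt cs ss j = true) :
    emitE cs ss j (some j) = '_' :: cs[j] :: emitE cs ss (j + 1) none := by
  conv_lhs => rw [emitE]
  rw [dif_pos hj]
  simp only [Bool.not_eq_true] at hm
  simp only [hm, if_false, Bool.false_eq_true]
  rw [if_pos True.intro]

lemma emitE_live_go {cs ss : List Char} {j e : Nat} (hj : j < cs.length)
    (hm : ¬ matchAt cs ss j = true) (hne : j ≠ e) :
    emitE cs ss j (some e) = cs[j] :: emitE cs ss (j + 1) (some e) := by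
  conv_lhs => rw [emitE]
  rw [dif_pos hj]
  simp only [Bool.not_eq_true] at hm
  simp only [hm, if_false, Bool.false_eq_true, if_neg hne]

lemma runA_stop {cs ss : List Char} {j : Nat} {opn close : Int} {ans : List Char}
    (hj : ¬ j < cs.length) :
    runA cs ss j opn close ans = if 0 < close then ans ++ ['_'] else ans := by
  rw [runA, dif_neg hj]

lemma runA_match {cs ss : List Char} {j : Nat} {opn close : Int} {ans : List Char}
    (hj : j < cs.length) (hm : matchAt cs ss j = true) :
    runA cs ss j opn close ans =
      runA cs ss (j + 1) (if opn < 0 then (j : Int) else opn) ((j : Int) + ss.length)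
        ((if opn < 0 then ans ++ ['_'] else ans) ++ [cs[j]]) := by
  rw [runA, dif_pos hj, if_pos ((match_iff cs ss j).mpr hm)]

lemma runA_close {cs ss : List Char} {j : Nat} {opn close : Int} {ans : List Char}
    (hj : j < cs.length) (hm : ¬ matchAt cs ss j = true) (hc : (j : Int) = close) :
    runA cs ss j opn close ans = runA cs ss (j + 1) (-1) (-1) (ans ++ ['_'] ++ [cs[j]]) := by
  rw [runA, dif_pos hj, if_neg (fun h => hm ((match_iff cs ss j).mp h)), if_pos hc]

lemma runA_go {cs ss : List Char} {j : Nat} {opn close : Int} {ans : List Char}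
    (hj : j < cs.length) (hm : ¬ matchAt cs ss j = true) (hc : ¬ (j : Int) = close) :
    runA cs ss j opn close ans = runA cs ss (j + 1) opn close (ans ++ [cs[j]]) := by
  rw [runA, dif_pos hj, if_neg (fun h => hm ((match_iff cs ss j).mp h)), if_neg hc]

lemma take_peel (cs : List Char) (j E : Nat) (hj : j < cs.length) (hE : j + 1 ≤ E) :
    (cs.drop j).take (E - j) = cs[j] :: (cs.drop (j + 1)).take (E - (j + 1)) := by
  rw [List.drop_eq_getElem_cons hj]
  have h : E - j = (E - (j + 1)) + 1 := by omega
  rw [h, List.take_succ_cons]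

lemma mergeTop_head_lt (n j : Nat) (l : List Nat) (hl : ∀ x ∈ l, j < x) :
    ∀ p ∈ (mergeTop n l).head?, j < p.1 := by
  cases l with
  | nil => simp [mergeTop]
  | cons s t =>
      intro p hp
      rw [mergeTop] at hp
      simp only [List.head?_cons, Option.mem_def, Option.some.injEq] at hp
      rw [← hp]
      exact hl s List.mem_cons_self

-- the core correspondence: the event stream equals B's stitched intervals
lemma emit_stitch (cs ss : List Char) (hss : ss ≠ []) : ∀ k j, cs.length - j ≤ k →
    (emitE cs ss j none = stitchB cs j (mergeTop ss.length (matchesFrom cs ss j))) ∧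
    (∀ e, j ≤ e → e ≤ cs.length → emitE cs ss j (some e) =
      ((cs.drop j).take (chainE ss.length e (matchesFrom cs ss j) - j)) ++
        '_' :: stitchB cs (chainE ss.length e (matchesFrom cs ss j))
          (mergeTop ss.length (chainRest ss.length e (matchesFrom cs ss j)))) := by
  have hn : 0 < ss.length := List.length_pos_of_ne_nil hss
  have stop : ∀ j, ¬ j < cs.length →
      (emitE cs ss j none = stitchB cs j (mergeTop ss.length (matchesFrom cs ss j))) ∧
      (∀ e, j ≤ e → e ≤ cs.length → emitE cs ss j (some e) =
        ((cs.drop j).take (chainE ss.length e (matchesFrom cs ss j) - j)) ++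
          '_' :: stitchB cs (chainE ss.length e (matchesFrom cs ss j))
            (mergeTop ss.length (chainRest ss.length e (matchesFrom cs ss j)))) := by
    intro j hj
    constructor
    · rw [emitE_stop_dead hj, matchesFrom_stop cs ss j hj]
      simp [mergeTop, stitchB, List.drop_eq_nil_of_le (by omega : cs.length ≤ j)]
    · intro e hje hem
      rw [emitE_stop_live hj, matchesFrom_stop cs ss j hj]
      simp only [chainE, chainRest, mergeTop, stitchB]
      rw [List.drop_eq_nil_of_le (by omega : cs.length ≤ j),
        List.drop_eq_nil_of_le (by omega : cs.length ≤ e)]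
      simp
  intro k
  induction k with
  | zero => intro j hk; exact stop j (by omega)
  | succ k ih =>
      intro j hk
      by_cases hj : j < cs.length
      · have hge1 : ∀ x ∈ matchesFrom cs ss (j + 1), j + 1 ≤ x := matchesFrom_ge cs ss (j + 1)
        constructor
        · by_cases hm : matchAt cs ss j = true
          · have hjn : j + ss.length ≤ cs.length := matchAt_le hm hss
            have hlive := (ih (j + 1) (by omega)).2 (j + ss.length) (by omega) hjn
            have hE : j + ss.length ≤ chainE ss.length (j + ss.length) (matchesFrom cs ss (j + 1)) :=
              chainE_lb ss.length _ _ _ (fun x hx => by have := hge1 x hx; omega) le_rfl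
            rw [emitE_dead_match hj hm, matchesFrom_cons hj hm, mergeTop, hlive]
            simp only [stitchB]
            rw [Nat.sub_self, List.take_zero, take_peel cs j _ hj (by omega)]
            simp
          · rw [emitE_dead_skip hj hm, matchesFrom_skip hj hm, (ih (j + 1) (by omega)).1]
            exact (stitch_peel cs j _ hj
              (mergeTop_head_lt ss.length j _ (fun x hx => by have := hge1 x hx; omega))).symm
        · intro e hje hem
          by_cases hm : matchAt cs ss j = true
          · have hjn : j + ss.length ≤ cs.length := matchAt_le hm hss
            have hlive := (ih (j + 1) (by omega)).2 (j + ss.length) (by omega) hjn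
            have hE : j + ss.length ≤ chainE ss.length (j + ss.length) (matchesFrom cs ss (j + 1)) :=
              chainE_lb ss.length _ _ _ (fun x hx => by have := hge1 x hx; omega) le_rfl
            have h1 : chainE ss.length e (j :: matchesFrom cs ss (j + 1)) =
                chainE ss.length (j + ss.length) (matchesFrom cs ss (j + 1)) := by
              simp only [chainE]; rw [if_pos hje]
            have h2 : chainRest ss.length e (j :: matchesFrom cs ss (j + 1)) =
                chainRest ss.length (j + ss.length) (matchesFrom cs ss (j + 1)) := by
              simp only [chainRest]; rw [if_pos hje]
            rw [emitE_live_match hj hm, matchesFrom_cons hj hm, h1, h2, hlive,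
              take_peel cs j _ hj (by omega)]
            simp
          · by_cases hce : j = e
            · subst hce
              have hstop := chain_stop ss.length (matchesFrom cs ss (j + 1)) j
                (fun x hx => by have := hge1 x hx; omega)
              rw [emitE_live_close hj hm, matchesFrom_skip hj hm, hstop.1, hstop.2,
                (ih (j + 1) (by omega)).1,
                ← stitch_peel cs j _ hj
                  (mergeTop_head_lt ss.length j _ (fun x hx => by have := hge1 x hx; omega)),
                Nat.sub_self, List.take_zero]
              simp
            · have hlt : j < e := by omega
              have hE : j + 1 ≤ chainE ss.length e (matchesFrom cs ss (j + 1)) :=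
                chainE_lb ss.length _ e (j + 1) (fun x hx => by have := hge1 x hx; omega) (by omega)
              rw [emitE_live_go hj hm hce, matchesFrom_skip hj hm,
                (ih (j + 1) (by omega)).2 e (by omega) hem, take_peel cs j _ hj hE]
              simp
      · exact stop j hj

-- A's scan equals the event stream
lemma runA_emit (cs ss : List Char) (hss : ss ≠ []) : ∀ k j (ans : List Char), cs.length - j ≤ k →
    (runA cs ss j (-1) (-1) ans = ans ++ emitE cs ss j none) ∧
    (∀ (e : Nat) (opn : Int), 0 ≤ opn → j ≤ e → 0 < e →
      runA cs ss j opn (e : Int) ans = ans ++ emitE cs ss j (some e)) := by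
  have hn : 0 < ss.length := List.length_pos_of_ne_nil hss
  intro k
  induction k with
  | zero =>
      intro j ans hk
      have hj : ¬ j < cs.length := by omega
      constructor
      · rw [runA_stop hj, emitE_stop_dead hj]
        simp
      · intro e opn hopn hje he
        rw [runA_stop hj, emitE_stop_live hj, if_pos (by exact_mod_cast he : (0 : Int) < (e : Int))]
  | succ k ih =>
      intro j ans hk
      by_cases hj : j < cs.length
      · constructor
        · by_cases hm : matchAt cs ss j = true
          · have hcast : (j : Int) + ss.length = ((j + ss.length : Nat) : Int) := by push_cast; ring
            rw [runA_match hj hm, if_pos (by norm_num : (-1 : Int) < 0),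
              if_pos (by norm_num : (-1 : Int) < 0), hcast,
              (ih (j + 1) (ans ++ ['_'] ++ [cs[j]]) (by omega)).2 (j + ss.length) (j : Int)
                (by positivity) (by omega) (by omega),
              emitE_dead_match hj hm]
            simp
          · rw [runA_go hj hm (by omega), (ih (j + 1) (ans ++ [cs[j]]) (by omega)).1,
              emitE_dead_skip hj hm]
            simp
        · intro e opn hopn hje he
          by_cases hm : matchAt cs ss j = true
          · have hcast : (j : Int) + ss.length = ((j + ss.length : Nat) : Int) := by push_cast; ring
            rw [runA_match hj hm, if_neg (by omega : ¬ opn < 0), if_neg (by omega : ¬ opn < 0), hcast,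
              (ih (j + 1) (ans ++ [cs[j]]) (by omega)).2 (j + ss.length) opn hopn
                (by omega) (by omega),
              emitE_live_match hj hm]
            simp
          · by_cases hce : j = e
            · subst hce
              rw [runA_close hj hm rfl, (ih (j + 1) (ans ++ ['_'] ++ [cs[j]]) (by omega)).1,
                emitE_live_close hj hm]
              simp
            · rw [runA_go hj hm (by omega), (ih (j + 1) (ans ++ [cs[j]]) (by omega)).2 e opn
                  hopn (by omega) he,
                emitE_live_go hj hm hce]
              simp
      · constructor
        · rw [runA_stop hj, emitE_stop_dead hj]
          simp
        · intro e opn hopn hje he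
          rw [runA_stop hj, emitE_stop_live hj, if_pos (by exact_mod_cast he : (0 : Int) < (e : Int))]

-- ===== VERDICT (by name: the statement is the Claim_ definition above) =====
theorem underscorifySubstring_spec : Claim_equal_underscorifySubstring := by
  intro s sub _ hpre
  have hss : sub.toList ≠ [] := fun h => hpre (String.toList_eq_nil_iff.mp h)
  simp only [Spec_underscorifySubstring, underscorifySubstring, underscorifySubstring_alt]
  have h1 := (runA_emit s.toList sub.toList hss s.toList.length 0 [] (by omega)).1
  have h2 := (emit_stitch s.toList sub.toList hss s.toList.length 0 (by omega)).1
  rw [h1, List.nil_append, h2, foldl_mergeTop]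
  congr 2
  rw [matchesFrom_eq_filter s.toList sub.toList 0, List.range_eq_range', Nat.sub_zero]
  simp [matchAt]
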